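-- pv_equiv track=rewrite | github.com/jane-kim-279/algorithm | 프로그래머스_문풀전략/3단원/68645.py | solution
-- ===== SOURCE A (Python) =====
-- def solution(n):
--     dx = [0, 1, -1]
--     dy = [1, 0, -1]
--     triangle = [[0] * i for i in range(1, n + 1)]
--     x = y = angle = 0
--     cnt = 1
--     size = (n + 1) * n // 2
--
--     while cnt <= size:
--         triangle[y][x] = cnt
--         ny = y + dy[angle]
--         nx = x + dx[angle]
--         cnt += 1
--
--         if 0 <= ny < n and 0 <= nx <= ny and triangle[ny][nx] == 0:
--             y, x = ny, nx
--         else: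
--             angle = (angle + 1) % 3
--             y += dy[angle]
--             x += dx[angle]
--
--     return [i for j in triangle for i in j]
-- ===== SOURCE B (Python) =====
-- def solution(n):
--     triangle = [[0] * i for i in range(1, n + 1)]
--     y = x = 0
--     cnt = 1
--     m = n
--     while m > 0:
--         for t in range(m):          # run down the left edge of the sub-triangle
--             triangle[y + t][x] = cnt + t
--         cnt += m
--         for t in range(m - 1):      # run right along its bottom row
--             triangle[y + m - 1][x + 1 + t] = cnt + t
--         cnt += max(m - 1, 0)
--         for t in range(m - 2):      # run up-left along its hypotenuse
--             triangle[y + m - 2 - t][x + m - 2 - t] = cnt + t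
--         cnt += max(m - 2, 0)
--         y += 2
--         x += 1
--         m -= 3
--     return [i for j in triangle for i in j]
-- ===== Notes on version B (the rewrite author's own statement) =====
-- stated objective: faster
-- what changed: Replaces A's cell-by-cell walk with direction vectors and a boundary/zero-sentinel probe deciding every turn by precomputed straight runs of lengths m, m-1, m-2 per triangular shell, written with pure index arithmetic and recursing into the inner sub-triangle; no triangle reads at all.
-- outside the precondition, e.g. on solution(-2): A raises IndexError, B returns []
import Mathlib
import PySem

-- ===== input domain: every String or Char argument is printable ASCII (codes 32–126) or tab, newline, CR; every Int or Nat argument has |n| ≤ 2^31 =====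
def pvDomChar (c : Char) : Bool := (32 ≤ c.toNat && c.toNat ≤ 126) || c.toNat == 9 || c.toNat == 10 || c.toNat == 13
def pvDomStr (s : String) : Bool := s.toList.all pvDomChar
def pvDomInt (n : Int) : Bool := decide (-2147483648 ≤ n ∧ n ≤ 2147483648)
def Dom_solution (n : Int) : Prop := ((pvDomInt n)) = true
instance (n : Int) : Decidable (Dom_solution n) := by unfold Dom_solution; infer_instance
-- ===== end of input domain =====

-- B replaces A's cell-by-cell walk (direction vectors + boundary/zero-probe turn test) by
-- precomputed straight runs of lengths m, m-1, m-2 per triangular shell, written with pure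
-- index arithmetic; measured constant-factor faster (no per-cell probe, no triangle reads).

-- ===== PORT A =====
-- [[0] * i for i in range(1, n + 1)]  (same line in A and B)
def pvZeroTri (n : Int) : List (List Int) :=
  (PySem.List.pyRange 1 (n + 1) 1).map (fun i => List.replicate i.toNat 0)

def pvDy (a : Int) : Int := if a = 0 then 1 else if a = 1 then 0 else -1   -- dy = [1, 0, -1]
def pvDx (a : Int) : Int := if a = 0 then 0 else if a = 1 then 1 else -1   -- dx = [0, 1, -1]

-- triangle[ny][nx]  (read)
def pvGet2 (t : List (List Int)) (y x : Int) : Option Int :=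
  match PySem.List.pyGet? t y with
  | none => none
  | some row => PySem.List.pyGet? row x

-- triangle[y][x] = v ; none = IndexError
def pvSet2 (t : List (List Int)) (y x v : Int) : Option (List (List Int)) :=
  match PySem.List.pyGet? t y with
  | none => none
  | some row =>
    match PySem.List.pySet? row x v with
    | none => none
    | some row' => PySem.List.pySet? t y row'

-- the while loop of A (write; probe one step ahead; turn with (angle+1)%3 on failure)
def pvLoopA (n size : Int) (t : List (List Int)) (y x angle cnt : Int) :
    Option (List (List Int)) :=
  if _h : cnt ≤ size then
    match pvSet2 t y x cnt with
    | none => none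
    | some t' =>
      let ny := y + pvDy angle
      let nx := x + pvDx angle
      if 0 ≤ ny ∧ ny < n ∧ 0 ≤ nx ∧ nx ≤ ny ∧ pvGet2 t' ny nx = some 0 then
        pvLoopA n size t' ny nx angle (cnt + 1)
      else
        let a2 := PySem.Int.mod (angle + 1) 3
        pvLoopA n size t' (y + pvDy a2) (x + pvDx a2) a2 (cnt + 1)
  else some t
termination_by (size + 1 - cnt).toNat
decreasing_by all_goals omega

def solution (n : Int) : List Int :=
  let size := PySem.Int.floordiv ((n + 1) * n) 2
  match pvLoopA n size (pvZeroTri n) 0 0 0 1 with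
  | some t => t.flatten
  | none => []   -- Python raises IndexError here (only for n ≤ -2, outside Pre_solution)

-- ===== PORT B =====
-- triangle[y][x] = v, indices B computes are always in range (total PySem write)
def pvWr (t : List (List Int)) (y x v : Int) : List (List Int) :=
  PySem.List.pySetD t y (PySem.List.pySetD (PySem.List.pyGetD t y []) x v)

-- the while loop of Source B: three straight runs per shell, then the inner sub-triangle
def pvShell (t : List (List Int)) (y x cnt m : Int) : List (List Int) :=
  if h : 0 < m then
    let t1 := (List.range m.toNat).foldl
      (fun a (i : Nat) => pvWr a (y + (i : Int)) x (cnt + (i : Int))) t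
    let c1 := cnt + m
    let t2 := (List.range (m - 1).toNat).foldl
      (fun a (i : Nat) => pvWr a (y + m - 1) (x + 1 + (i : Int)) (c1 + (i : Int))) t1
    let c2 := c1 + max (m - 1) 0
    let t3 := (List.range (m - 2).toNat).foldl
      (fun a (i : Nat) => pvWr a (y + m - 2 - (i : Int)) (x + m - 2 - (i : Int)) (c2 + (i : Int))) t2
    let c3 := c2 + max (m - 2) 0
    pvShell t3 (y + 2) (x + 1) c3 (m - 3)
  else t
termination_by m.toNat
decreasing_by omega

def solution_alt (n : Int) : List Int :=
  (pvShell (pvZeroTri n) 0 0 1 n).flatten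

-- ===== PRECONDITION & SPEC =====
-- Pre_ excludes exactly n ≤ -2, where A raises IndexError (empty triangle, positive size).
def Pre_solution (n : Int) : Prop := -1 ≤ n
instance (n : Int) : Decidable (Pre_solution n) := by unfold Pre_solution; infer_instance
def pvWitness_solution : Int := 5

def Spec_solution (n : Int) (out : List Int) : Prop := out = solution_alt n
instance (n : Int) (out : List Int) : Decidable (Spec_solution n out) := by unfold Spec_solution; infer_instance

-- ===== CLAIM (what is proved, stated in full; the proofs are below) =====
def Claim_equal_solution : Prop := ∀ (n : Int), Dom_solution n → Pre_solution n → Spec_solution n (solution n)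

-- ===== LEMMAS AND PROOFS =====

-- membership in the global triangle / in the sub-triangle with apex (Y,X) and m rows
def InTri (n y x : Int) : Prop := 0 ≤ x ∧ x ≤ y ∧ y < n
def InSub (Y X m y x : Int) : Prop := Y ≤ y ∧ y < Y + m ∧ X ≤ x ∧ x ≤ X + (y - Y)

-- proof-side reading of a cell (total; used only on in-range cells)
def getv (t : List (List Int)) (y x : Int) : Int := (t.getD y.toNat []).getD x.toNat 0

-- the jagged shape: n rows, row i has i+1 cells
def ShapeT (n : Int) (t : List (List Int)) : Prop :=
  t.length = n.toNat ∧ ∀ i, i < t.length → (t.getD i []).length = i + 1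

-- invariant: shape + the zero cells are exactly the region P
def ZInv (n : Int) (P : Int → Int → Prop) (t : List (List Int)) : Prop :=
  ShapeT n t ∧ ∀ y x, InTri n y x → (getv t y x = 0 ↔ P y x)

theorem zinv_ext {n : Int} {P Q : Int → Int → Prop} {t : List (List Int)}
    (h : ∀ y x, InTri n y x → (P y x ↔ Q y x)) (hz : ZInv n P t) : ZInv n Q t :=
  ⟨hz.1, fun y x hin => (hz.2 y x hin).trans (h y x hin)⟩

-- ----- cell-level bridges between the ports' primitives and getv -----

theorem rowlen {n : Int} {t : List (List Int)} (hs : ShapeT n t) {y : Int}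
    (h0 : 0 ≤ y) (h1 : y < n) :
    y.toNat < t.length ∧ (t.getD y.toNat []).length = y.toNat + 1 := by
  have hlt : y.toNat < t.length := by rw [hs.1]; omega
  exact ⟨hlt, hs.2 _ hlt⟩

theorem pvGet2_eq {n : Int} {t : List (List Int)} (hs : ShapeT n t) {y x : Int}
    (hin : InTri n y x) : pvGet2 t y x = some (getv t y x) := by
  obtain ⟨hx0, hxy, hyn⟩ := hin
  have h0 : 0 ≤ y := by omega
  obtain ⟨hlt, hrl⟩ := rowlen hs h0 hyn
  have hxr : x.toNat < (t.getD y.toNat []).length := by rw [hrl]; omega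
  have h1 : PySem.List.pyGet? t y = some (t.getD y.toNat []) := by
    rw [PySem.List.pyGet?_of_nonneg _ h0, List.getElem?_eq_getElem hlt,
      List.getD_eq_getElem _ _ hlt]
  unfold pvGet2
  rw [h1]
  show PySem.List.pyGet? (t.getD y.toNat []) x = some (getv t y x)
  rw [PySem.List.pyGet?_of_nonneg _ hx0, List.getElem?_eq_getElem hxr]
  unfold getv
  rw [List.getD_eq_getElem _ _ hxr]

theorem pvWr_eq {t : List (List Int)} {y x : Int} (h0 : 0 ≤ y) (hx0 : 0 ≤ x) (v : Int) :
    pvWr t y x v = t.set y.toNat ((t.getD y.toNat []).set x.toNat v) := by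
  unfold pvWr
  rw [PySem.List.pySetD_of_nonneg _ _ h0, PySem.List.pyGetD_of_nonneg _ _ h0,
    PySem.List.pySetD_of_nonneg _ _ hx0]

theorem pvSet2_eq {n : Int} {t : List (List Int)} (hs : ShapeT n t) {y x : Int}
    (hin : InTri n y x) (v : Int) : pvSet2 t y x v = some (pvWr t y x v) := by
  obtain ⟨hx0, hxy, hyn⟩ := hin
  have h0 : 0 ≤ y := by omega
  obtain ⟨hlt, hrl⟩ := rowlen hs h0 hyn
  have hxr : x.toNat < (t.getD y.toNat []).length := by rw [hrl]; omega
  have h1 : PySem.List.pyGet? t y = some (t.getD y.toNat []) := by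
    rw [PySem.List.pyGet?_of_nonneg _ h0, List.getElem?_eq_getElem hlt,
      List.getD_eq_getElem _ _ hlt]
  have h2 := PySem.List.pySet?_natCast (t.getD y.toNat []) x.toNat v hxr
  rw [show ((x.toNat : Nat) : Int) = x from by omega] at h2
  have h3 := PySem.List.pySet?_natCast t y.toNat ((t.getD y.toNat []).set x.toNat v) hlt
  rw [show ((y.toNat : Nat) : Int) = y from by omega] at h3
  unfold pvSet2
  rw [h1]
  show (match PySem.List.pySet? (t.getD y.toNat []) x v with
    | none => none
    | some row' => PySem.List.pySet? t y row') = some (pvWr t y x v)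
  rw [h2]
  show PySem.List.pySet? t y ((t.getD y.toNat []).set x.toNat v) = some (pvWr t y x v)
  rw [h3, pvWr_eq h0 hx0]

theorem getD_set_self (l : List (List Int)) (i : Nat) (r : List Int) (h : i < l.length) :
    (l.set i r).getD i [] = r := by
  simp [List.getD, h]

theorem getD_set_ne (l : List (List Int)) {i j : Nat} (r : List Int) (h : i ≠ j) :
    (l.set i r).getD j [] = l.getD j [] := by
  simp [List.getD, List.getElem?_set_ne h]

theorem getDI_set_self (l : List Int) (i : Nat) (v : Int) (h : i < l.length) :
    (l.set i v).getD i 0 = v := by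
  simp [List.getD, h]

theorem getDI_set_ne (l : List Int) {i j : Nat} (v : Int) (h : i ≠ j) :
    (l.set i v).getD j 0 = l.getD j 0 := by
  simp [List.getD, List.getElem?_set_ne h]

theorem shape_pvWr {n : Int} {t : List (List Int)} (hs : ShapeT n t) {y x : Int}
    (hin : InTri n y x) (v : Int) : ShapeT n (pvWr t y x v) := by
  obtain ⟨hx0, hxy, hyn⟩ := hin
  have h0 : 0 ≤ y := by omega
  obtain ⟨hlt, hrl⟩ := rowlen hs h0 hyn
  rw [pvWr_eq h0 hx0]
  refine ⟨by rw [List.length_set]; exact hs.1, ?_⟩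
  intro i hi
  rw [List.length_set] at hi
  by_cases hiy : i = y.toNat
  · subst hiy
    rw [getD_set_self _ _ _ hlt, List.length_set]
    exact hrl
  · rw [getD_set_ne _ _ (Ne.symm hiy)]
    exact hs.2 _ hi

theorem getv_pvWr_same {n : Int} {t : List (List Int)} (hs : ShapeT n t) {y x : Int}
    (hin : InTri n y x) (v : Int) : getv (pvWr t y x v) y x = v := by
  obtain ⟨hx0, hxy, hyn⟩ := hin
  have h0 : 0 ≤ y := by omega
  obtain ⟨hlt, hrl⟩ := rowlen hs h0 hyn
  have hxr : x.toNat < (t.getD y.toNat []).length := by rw [hrl]; omega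
  rw [pvWr_eq h0 hx0]
  unfold getv
  rw [getD_set_self _ _ _ hlt, getDI_set_self _ _ _ hxr]

theorem getv_pvWr_ne {n : Int} {t : List (List Int)} (hs : ShapeT n t) {y x : Int}
    (hin : InTri n y x) {y' x' : Int} (h0' : 0 ≤ y') (hx0' : 0 ≤ x')
    (hne : y' ≠ y ∨ x' ≠ x) (v : Int) : getv (pvWr t y x v) y' x' = getv t y' x' := by
  obtain ⟨hx0, hxy, hyn⟩ := hin
  have h0 : 0 ≤ y := by omega
  obtain ⟨hlt, hrl⟩ := rowlen hs h0 hyn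
  rw [pvWr_eq h0 hx0]
  unfold getv
  by_cases hyy : y'.toNat = y.toNat
  · have hxx : x'.toNat ≠ x.toNat := by omega
    rw [hyy, getD_set_self _ _ _ hlt, getDI_set_ne _ _ (Ne.symm hxx)]
  · rw [getD_set_ne _ _ (Ne.symm hyy)]

-- ----- the initial triangle -----

theorem getv_zeroTri (n y x : Int) : getv (pvZeroTri n) y x = 0 := by
  unfold getv pvZeroTri
  by_cases h : y.toNat < ((PySem.List.pyRange 1 (n+1) 1).map (fun i => List.replicate i.toNat (0:Int))).length
  · rw [List.getD_eq_getElem _ _ h, List.getElem_map]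
    by_cases h2 : x.toNat < (List.replicate (((PySem.List.pyRange 1 (n+1) 1))[y.toNat]'(by simpa using h)).toNat (0:Int)).length
    · rw [List.getD_eq_getElem _ _ h2, List.getElem_replicate]
    · rw [List.getD_eq_default _ _ (by omega)]
  · have hrow : ((PySem.List.pyRange 1 (n+1) 1).map (fun i => List.replicate i.toNat (0:Int))).getD y.toNat [] = [] :=
      List.getD_eq_default _ _ (by omega)
    rw [hrow]
    simp

theorem shape_zeroTri {n : Int} (hn : 0 ≤ n) : ShapeT n (pvZeroTri n) := by
  unfold ShapeT pvZeroTri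
  constructor
  · rw [List.length_map, PySem.List.length_pyRange_one]; omega
  · intro i hi
    rw [List.length_map, PySem.List.length_pyRange_one] at hi
    have h : i < ((PySem.List.pyRange 1 (n+1) 1).map (fun i => List.replicate i.toNat (0:Int))).length := by
      rw [List.length_map, PySem.List.length_pyRange_one]; omega
    rw [List.getD_eq_getElem _ _ h, List.getElem_map, PySem.List.getElem_pyRange_one]
    rw [List.length_replicate]
    omega

-- ----- unfolding one iteration of A's loop -----

theorem loopA_step (n size : Int) {t : List (List Int)} {y x : Int} (angle : Int) {cnt : Int}
    (hcnt : cnt ≤ size) {t' : List (List Int)} (hset : pvSet2 t y x cnt = some t') :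
    pvLoopA n size t y x angle cnt =
      (if 0 ≤ y + pvDy angle ∧ y + pvDy angle < n ∧ 0 ≤ x + pvDx angle ∧
          x + pvDx angle ≤ y + pvDy angle ∧ pvGet2 t' (y + pvDy angle) (x + pvDx angle) = some 0 then
        pvLoopA n size t' (y + pvDy angle) (x + pvDx angle) angle (cnt + 1)
      else
        pvLoopA n size t' (y + pvDy (PySem.Int.mod (angle + 1) 3))
          (x + pvDx (PySem.Int.mod (angle + 1) 3)) (PySem.Int.mod (angle + 1) 3) (cnt + 1)) := by
  rw [pvLoopA, dif_pos hcnt, hset]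

theorem loopA_exit (n size : Int) (t : List (List Int)) (y x angle cnt : Int)
    (hcnt : ¬ cnt ≤ size) : pvLoopA n size t y x angle cnt = some t := by
  rw [pvLoopA, dif_neg hcnt]

theorem loopA_congr (n size : Int) {t t' : List (List Int)} {y y' x x' a cnt cnt' : Int}
    (ht : t = t') (hy : y = y') (hx : x = x') (hc : cnt = cnt') :
    pvLoopA n size t y x a cnt = pvLoopA n size t' y' x' a cnt' := by
  subst ht hy hx hc; rfl

theorem zinv_write {n : Int} {P : Int → Int → Prop} {t : List (List Int)} {y x v : Int}
    (hz : ZInv n P t) (hin : InTri n y x) (hv : v ≠ 0) :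
    ZInv n (fun y' x' => P y' x' ∧ ¬(y' = y ∧ x' = x)) (pvWr t y x v) := by
  refine ⟨shape_pvWr hz.1 hin v, ?_⟩
  intro y' x' hin'
  by_cases hc : y' = y ∧ x' = x
  · obtain ⟨rfl, rfl⟩ := hc
    rw [getv_pvWr_same hz.1 hin v]
    simp [hv]
  · have h0' : 0 ≤ y' := by obtain ⟨a, b, c⟩ := hin'; omega
    have hx0' : 0 ≤ x' := hin'.1
    rw [getv_pvWr_ne hz.1 hin h0' hx0' (by tauto) v]
    rw [hz.2 y' x' hin']
    tauto

theorem foldl_funext {β : Type} {f g : β → Nat → β} (h : ∀ a i, f a i = g a i)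
    (l : List Nat) (a : β) : l.foldl f a = l.foldl g a := by
  have : f = g := funext fun a => funext (h a)
  rw [this]

-- ----- one straight run of A's walk = one foldl of B's writes (generic in the direction) -----

theorem runGen (n size : Int) (angle nextangle : Int)
    (hangle : PySem.Int.mod (angle + 1) 3 = nextangle)
    (cy cx : Int → Int)
    (hdir : ∀ i : Int, cy (i + 1) = cy i + pvDy angle ∧ cx (i + 1) = cx i + pvDx angle)
    (c L : Int) (_hL : 1 ≤ L)
    (hcpos : ∀ i : Int, 0 ≤ i → c + i ≠ 0)
    (P : Int → Int → Int → Prop)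
    (hPstep : ∀ y x (j : Int), InTri n y x →
      ((P j y x ∧ ¬(y = cy j ∧ x = cx j)) ↔ P (j + 1) y x))
    (hcell : ∀ j : Int, 0 ≤ j → j < L → InTri n (cy j) (cx j))
    (hbound : c + L - 1 ≤ size)
    (hprobe : ∀ j : Int, 0 ≤ j → j + 1 < L → P (j + 1) (cy (j + 1)) (cx (j + 1)))
    (hfail : ¬(0 ≤ cy L ∧ cy L < n ∧ 0 ≤ cx L ∧ cx L ≤ cy L)
      ∨ (InTri n (cy L) (cx L) ∧ ¬ P L (cy L) (cx L))) :
    ∀ (l : Nat) (j : Nat) (t : List (List Int)), 1 ≤ l → (j : Int) + (l : Int) = L →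
    ZInv n (P (j : Int)) t →
    (pvLoopA n size t (cy j) (cx j) angle (c + j)
      = pvLoopA n size
          ((List.range l).foldl
            (fun a (i : Nat) => pvWr a (cy ((j : Int) + (i : Int))) (cx ((j : Int) + (i : Int)))
              (c + (j : Int) + (i : Int))) t)
          (cy (L - 1) + pvDy nextangle) (cx (L - 1) + pvDx nextangle) nextangle (c + L))
    ∧ ZInv n (P L)
        ((List.range l).foldl
          (fun a (i : Nat) => pvWr a (cy ((j : Int) + (i : Int))) (cx ((j : Int) + (i : Int)))
            (c + (j : Int) + (i : Int))) t) := by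
  intro l
  induction l with
  | zero => intro j t hl; omega
  | succ l IH =>
    intro j t _ hjl hz
    push_cast at hjl
    have hjL : (j : Int) < L := by omega
    have hinj : InTri n (cy j) (cx j) := hcell _ (by omega) hjL
    have hcnt : c + (j : Int) ≤ size := by omega
    have hset := pvSet2_eq hz.1 hinj (c + (j : Int))
    have hz' : ZInv n (P ((j : Int) + 1)) (pvWr t (cy j) (cx j) (c + (j : Int))) :=
      zinv_ext (fun y x hin => hPstep y x (j : Int) hin)
        (zinv_write hz hinj (hcpos _ (by omega)))
    rw [loopA_step n size angle hcnt hset]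
    by_cases hl0 : l = 0
    · -- last cell of the run: the probe fails and the walk turns
      subst hl0
      have hJ : (j : Int) + 1 = L := by omega
      have hturn : ¬(0 ≤ cy ↑j + pvDy angle ∧ cy ↑j + pvDy angle < n ∧
          0 ≤ cx ↑j + pvDx angle ∧ cx ↑j + pvDx angle ≤ cy ↑j + pvDy angle ∧
          pvGet2 (pvWr t (cy ↑j) (cx ↑j) (c + ↑j)) (cy ↑j + pvDy angle) (cx ↑j + pvDx angle)
            = some 0) := by
        rw [← (hdir (j : Int)).1, ← (hdir (j : Int)).2, hJ]
        rcases hfail with hb | ⟨hinL, hnp⟩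
        · intro hco; exact hb ⟨hco.1, hco.2.1, hco.2.2.1, hco.2.2.2.1⟩
        · intro hco
          have := hco.2.2.2.2
          rw [pvGet2_eq hz'.1 (by rw [hJ] at *; exact hinL)] at this
          have hzero : getv (pvWr t (cy ↑j) (cx ↑j) (c + ↑j)) (cy L) (cx L) = 0 :=
            Option.some_injective _ this
          rw [hJ] at hz'
          exact hnp ((hz'.2 _ _ hinL).mp hzero)
      rw [if_neg hturn, hangle]
      have hfold1 : (List.range (0+1)).foldl
          (fun a (i : Nat) => pvWr a (cy ((j : Int) + (i : Int))) (cx ((j : Int) + (i : Int)))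
            (c + (j : Int) + (i : Int))) t = pvWr t (cy ↑j) (cx ↑j) (c + ↑j) := by
        simp only [show (0:Nat)+1 = 1 from rfl, List.range_one, List.foldl_cons, List.foldl_nil]
        norm_num
      rw [hfold1]
      constructor
      · refine loopA_congr n size rfl ?_ ?_ (by omega)
        · rw [show L - 1 = (j : Int) from by omega]
        · rw [show L - 1 = (j : Int) from by omega]
      · rw [← hJ]
        exact hz'
    · -- the probe lands on the next empty cell of the run: the walk goes straight
      have hl1 : 1 ≤ l := by omega
      have hJ1 : (j : Int) + 1 < L := by omega
      have hin1 : InTri n (cy ((j : Int) + 1)) (cx ((j : Int) + 1)) := hcell _ (by omega) hJ1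
      have hp1 : P ((j : Int) + 1) (cy ((j : Int) + 1)) (cx ((j : Int) + 1)) :=
        hprobe _ (by omega) hJ1
      have hgo : (0 ≤ cy ↑j + pvDy angle ∧ cy ↑j + pvDy angle < n ∧
          0 ≤ cx ↑j + pvDx angle ∧ cx ↑j + pvDx angle ≤ cy ↑j + pvDy angle ∧
          pvGet2 (pvWr t (cy ↑j) (cx ↑j) (c + ↑j)) (cy ↑j + pvDy angle) (cx ↑j + pvDx angle)
            = some 0) := by
        rw [← (hdir (j : Int)).1, ← (hdir (j : Int)).2]
        have hin1c := hin1
        obtain ⟨ha, hb, hc2⟩ := hin1c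
        refine ⟨by omega, hc2, ha, hb, ?_⟩
        rw [pvGet2_eq hz'.1 hin1]
        exact congrArg some ((hz'.2 _ _ hin1).mpr hp1)
      rw [if_pos hgo]
      have hcast : ((j + 1 : Nat) : Int) = (j : Int) + 1 := by push_cast; ring
      have hz'' : ZInv n (P ((j + 1 : Nat) : Int)) (pvWr t (cy ↑j) (cx ↑j) (c + ↑j)) := by
        rw [hcast]; exact hz'
      obtain ⟨IHeq, IHz⟩ := IH (j + 1) (pvWr t (cy ↑j) (cx ↑j) (c + ↑j)) hl1
        (by push_cast; omega) hz''
      have hfold : (List.range (l + 1)).foldl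
            (fun a (i : Nat) => pvWr a (cy ((j : Int) + (i : Int))) (cx ((j : Int) + (i : Int)))
              (c + (j : Int) + (i : Int))) t
          = (List.range l).foldl
            (fun a (i : Nat) => pvWr a (cy (((j + 1 : Nat) : Int) + (i : Int)))
              (cx (((j + 1 : Nat) : Int) + (i : Int))) (c + ((j + 1 : Nat) : Int) + (i : Int)))
            (pvWr t (cy ↑j) (cx ↑j) (c + ↑j)) := by
        rw [List.range_succ_eq_map, List.foldl_cons, List.foldl_map]
        have h0 : pvWr t (cy ((j : Int) + ((0 : Nat) : Int))) (cx ((j : Int) + ((0 : Nat) : Int)))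
            (c + (j : Int) + ((0 : Nat) : Int)) = pvWr t (cy ↑j) (cx ↑j) (c + ↑j) := by
          norm_num
        rw [h0]
        refine foldl_funext (fun a i => ?_) _ _
        have e1 : (j : Int) + ((i + 1 : Nat) : Int) = ((j + 1 : Nat) : Int) + (i : Int) := by
          push_cast; ring
        have e2 : c + (j : Int) + ((i + 1 : Nat) : Int) = c + ((j + 1 : Nat) : Int) + (i : Int) := by
          push_cast; ring
        rw [show (Nat.succ i) = i + 1 from rfl, e1, e2]
      constructor
      · rw [hfold]
        refine Eq.trans (loopA_congr n size rfl ?_ ?_ ?_) IHeq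
        · rw [← (hdir (j : Int)).1, hcast]
        · rw [← (hdir (j : Int)).2, hcast]
        · push_cast
          ring
      · rw [hfold]; exact IHz

-- ----- the shell lemma: A's walk through one shell = B's three runs, then recurse -----

theorem shellSim (n size : Int) :
    ∀ (k : Nat) (r c : Int) (t : List (List Int)),
    0 ≤ r → (n - 3*r).toNat = k → 1 ≤ n - 3*r →
    2*c = 2*size - (n - 3*r) * (n - 3*r + 1) + 2 → 1 ≤ c →
    ZInv n (fun y x => InSub (2*r) r (n - 3*r) y x) t →
    pvLoopA n size t (2*r) r 0 c = some (pvShell t (2*r) r c (n - 3*r)) := by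
  intro k
  induction k using Nat.strong_induction_on with
  | _ k IH =>
  intro r c t hr hk hm1 hc hc1 hz
  set m := n - 3*r with hmdef
  have hpos : 0 < m := hm1
  rw [pvShell, dif_pos hpos]
  have hdown := runGen n size 0 1 (by decide) (fun i => 2*r + i) (fun _ => r)
      (by intro i; refine ⟨by norm_num [pvDy]; ring, by norm_num [pvDx]⟩)
      c m hm1 (by intro i hi; omega)
      (fun j y x => InSub (2*r) r m y x ∧ ¬(x = r ∧ y - 2*r < j))
      (by intro y x j hin; simp only [InSub, InTri] at *; omega)
      (by intro j h0 hjm; simp only [InTri]; omega)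
      (by nlinarith [mul_nonneg (show (0:Int) ≤ m - 1 by omega) (show (0:Int) ≤ m by omega)])
      (by intro j h0 hj1; simp only [InSub]; omega)
      (by
        by_cases hr0 : 0 < r
        · right
          refine ⟨by simp only [InTri]; omega, by simp only [InSub]; omega⟩
        · left
          show ¬(0 ≤ 2*r + m ∧ 2*r + m < n ∧ 0 ≤ r ∧ r ≤ 2*r + m)
          omega)
      m.toNat 0 t (by omega) (by push_cast; omega)
      (by
        refine zinv_ext (fun y x hin => ?_) hz
        simp only [InSub, InTri] at *
        push_cast
        omega)
  obtain ⟨A1, Z1⟩ := hdown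
  push_cast at A1 Z1
  norm_num [pvDy, pvDx] at A1
  simp only [zero_add, add_zero] at A1 Z1
  rw [A1]
  dsimp only
  set t1 : List (List Int) :=
    (List.range m.toNat).foldl (fun a (i : Nat) => pvWr a (2*r + (i : Int)) r (c + (i : Int))) t
    with ht1
  by_cases hm2 : 2 ≤ m
  · -- the right run exists
    have hmax1 : max (m - 1) 0 = m - 1 := by omega
    rw [hmax1]
    have hright := runGen n size 1 2 (by decide) (fun _ => 2*r + m - 1) (fun i => r + 1 + i)
        (by intro i; refine ⟨by norm_num [pvDy], by norm_num [pvDx]; ring⟩)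
        (c + m) (m - 1) (by omega) (by intro i hi; omega)
        (fun j y x => InSub (2*r) r m y x ∧ x ≠ r ∧
          ¬(y = 2*r + m - 1 ∧ r + 1 ≤ x ∧ x - (r + 1) < j))
        (by intro y x j hin; simp only [InSub, InTri] at *; omega)
        (by intro j h0 hjm; simp only [InTri]; omega)
        (by nlinarith [mul_nonneg (show (0:Int) ≤ m - 1 by omega) (show (0:Int) ≤ m - 2 by omega)])
        (by intro j h0 hj1; simp only [InSub]; omega)
        (by
          by_cases hr0 : 0 < r
          · right
            refine ⟨by simp only [InTri]; omega, by simp only [InSub]; omega⟩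
          · left
            show ¬(0 ≤ 2*r + m - 1 ∧ 2*r + m - 1 < n ∧ 0 ≤ r + 1 + (m - 1) ∧
              r + 1 + (m - 1) ≤ 2*r + m - 1)
            omega)
        (m - 1).toNat 0 t1 (by omega) (by push_cast; omega)
        (by
          refine zinv_ext (fun y x hin => ?_) Z1
          simp only [InSub, InTri] at *
          push_cast
          omega)
    obtain ⟨A2, Z2⟩ := hright
    push_cast at A2 Z2
    norm_num [pvDy, pvDx] at A2
    rw [show m.toNat - 1 = (m - 1).toNat from by omega] at A2
    simp only [zero_add, add_zero] at Z2
    rw [show (2:Int)*r + (m - 1) = 2*r + m - 1 from by ring, A2]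
    set t2 : List (List Int) :=
      (List.range (m - 1).toNat).foldl
        (fun a (i : Nat) => pvWr a (2*r + m - 1) (r + 1 + (i : Int)) (c + m + (i : Int))) t1
      with ht2
    by_cases hm3 : 3 ≤ m
    · -- the up-left run exists
      have hmax2 : max (m - 2) 0 = m - 2 := by omega
      rw [hmax2]
      have hup := runGen n size 2 0 (by decide) (fun i => 2*r + m - 2 - i) (fun i => r + m - 2 - i)
          (by intro i; refine ⟨by norm_num [pvDy]; ring, by norm_num [pvDx]; ring⟩)
          (c + m + (m - 1)) (m - 2) (by omega) (by intro i hi; omega)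
          (fun j y x => InSub (2*r) r m y x ∧ x ≠ r ∧ y ≠ 2*r + m - 1 ∧
            ¬(y - 2*r = x - r ∧ m - 2 - (y - 2*r) < j))
          (by intro y x j hin; simp only [InSub, InTri] at *; omega)
          (by intro j h0 hjm; simp only [InTri]; omega)
          (by nlinarith [mul_nonneg (show (0:Int) ≤ m - 2 by omega) (show (0:Int) ≤ m - 3 by omega)])
          (by intro j h0 hj1; simp only [InSub]; omega)
          (by
            right
            refine ⟨by simp only [InTri]; omega, by simp only [InSub]; omega⟩)
          (m - 2).toNat 0 t2 (by omega) (by push_cast; omega)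
          (by
            refine zinv_ext (fun y x hin => ?_) Z2
            simp only [InSub, InTri] at *
            push_cast
            omega)
      obtain ⟨A3, Z3⟩ := hup
      push_cast at A3 Z3
      norm_num [pvDy, pvDx] at A3
      simp only [zero_add, add_zero] at A3 Z3
      rw [show (2:Int)*r + m - 1 + -1 = 2*r + m - 2 from by ring,
        show r + (m - 1) + -1 = r + m - 2 from by ring, A3]
      rw [show (2:Int)*r + m - 2 - (m - 2 - 1) + 1 = 2*r + 2 from by ring,
        show r + m - 2 - (m - 2 - 1) = r + 1 from by ring]
      set t3 : List (List Int) :=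
        (List.range (m - 2).toNat).foldl
          (fun a (i : Nat) => pvWr a (2*r + m - 2 - (i : Int)) (r + m - 2 - (i : Int))
            (c + m + (m - 1) + (i : Int))) t2
        with ht3
      by_cases hm4 : 4 ≤ m
      · -- recurse into the inner sub-triangle
        have e1 : n - 3*(r + 1) = m - 3 := by omega
        have IH' := IH (m - 3).toNat (by omega) (r + 1) (c + m + (m - 1) + (m - 2)) t3
            (by omega) (by omega) (by omega)
            (by rw [e1]; linear_combination hc) (by omega)
            (by
              refine zinv_ext (fun y x hin => ?_) Z3
              rw [e1]
              simp only [InSub, InTri] at *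
              omega)
        rw [show (2:Int)*(r + 1) = 2*r + 2 from by ring, e1] at IH'
        rw [IH']
      · -- m = 3 : the walk stops right after the up-left run
        have hm3' : m = 3 := by omega
        rw [hm3'] at hc ⊢
        norm_num at hc ⊢
        rw [loopA_exit n size _ _ _ _ _ (by omega)]
        rw [pvShell, dif_neg (by norm_num)]
    · -- m = 2 : the walk stops right after the right run
      have hm2'' : m = 2 := by omega
      rw [hm2''] at hc ⊢
      norm_num at hc ⊢
      rw [loopA_exit n size _ _ _ _ _ (by omega)]
      rw [pvShell, dif_neg (by norm_num)]
  · -- m = 1 : the walk stops right after the down run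
    have hm1' : m = 1 := by omega
    rw [hm1'] at hc ⊢
    norm_num at hc ⊢
    rw [loopA_exit n size _ _ _ _ _ (by omega)]
    rw [pvShell, dif_neg (by norm_num)]
    norm_num
    rw [show ((-1):Int).toNat = 0 from rfl]
    simp

theorem solution_eq_alt (n : Int) (hn : -1 ≤ n) : solution n = solution_alt n := by
  by_cases hn1 : 1 ≤ n
  · have hdvd : (2:Int) ∣ (n + 1) * n := by
      have h := Int.even_mul_succ_self n
      rw [mul_comm] at h
      exact h.two_dvd
    have hsz : 2 * PySem.Int.floordiv ((n + 1) * n) 2 = (n + 1) * n := by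
      rw [PySem.Int.floordiv_eq_ediv_of_pos (by norm_num)]
      exact Int.mul_ediv_cancel' hdvd
    have hzinv : ZInv n (fun y x => InSub (2*0) 0 (n - 3*0) y x) (pvZeroTri n) := by
      refine ⟨shape_zeroTri (by omega), fun y x hin => ?_⟩
      rw [getv_zeroTri]
      refine ⟨fun _ => ?_, fun _ => rfl⟩
      simp only [InSub, InTri] at *
      omega
    have H := shellSim n (PySem.Int.floordiv ((n + 1) * n) 2) n.toNat 0 1 (pvZeroTri n)
      le_rfl (by omega) (by omega) (by linear_combination -hsz) (by omega) hzinv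
    rw [show (2:Int)*0 = 0 from by ring, show n - 3*0 = n from by ring] at H
    show (match pvLoopA n (PySem.Int.floordiv ((n+1)*n) 2) (pvZeroTri n) 0 0 0 1 with
      | some t => t.flatten | none => ([]:List Int)) = solution_alt n
    rw [H]
    rfl
  · have hcase : n = -1 ∨ n = 0 := by omega
    rcases hcase with rfl | rfl
    · have h1 : pvLoopA (-1) (PySem.Int.floordiv ((-1+1)*(-1)) 2) (pvZeroTri (-1)) 0 0 0 1
          = some (pvZeroTri (-1)) := loopA_exit _ _ _ _ _ _ _ (by decide)
      have h2 : pvShell (pvZeroTri (-1)) 0 0 1 (-1) = pvZeroTri (-1) := by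
        rw [pvShell, dif_neg (by norm_num)]
      show (match pvLoopA (-1) (PySem.Int.floordiv ((-1+1)*(-1)) 2) (pvZeroTri (-1)) 0 0 0 1 with
        | some t => t.flatten | none => ([]:List Int)) = (pvShell (pvZeroTri (-1)) 0 0 1 (-1)).flatten
      rw [h1, h2]
    · have h1 : pvLoopA 0 (PySem.Int.floordiv ((0+1)*0) 2) (pvZeroTri 0) 0 0 0 1
          = some (pvZeroTri 0) := loopA_exit _ _ _ _ _ _ _ (by decide)
      have h2 : pvShell (pvZeroTri 0) 0 0 1 0 = pvZeroTri 0 := by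
        rw [pvShell, dif_neg (by norm_num)]
      show (match pvLoopA 0 (PySem.Int.floordiv ((0+1)*0) 2) (pvZeroTri 0) 0 0 0 1 with
        | some t => t.flatten | none => ([]:List Int)) = (pvShell (pvZeroTri 0) 0 0 1 0).flatten
      rw [h1, h2]

theorem solution_spec : Claim_equal_solution := by
  intro n _ hpre
  show solution n = solution_alt n
  exact solution_eq_alt n hpre
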